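-- pv_equiv track=rewrite | github.com/peterwilliams97/stats | k_results.py | make_sort_key
-- ===== SOURCE A (Python) =====
-- def is_upper(s):
--     return s.upper() == s
--
-- SORT_KEY_NAMES = ['k', 'n', 'r', 'm', 'd']
--
-- def make_sort_key(options):
--     """Make results sort key described in module doc string
--     """
--     sort_order = SORT_KEY_NAMES[:]
--     sort_order_lower = [s.lower() for s in sort_order]
--
--     for s in reversed(options):
--         if not s.lower() in sort_order_lower:
--             continue
--         i = sort_order_lower.index(s.lower())
--         sort_order = [s] + sort_order[:i] + sort_order[i + 1:]
--         sort_order_lower = [s.lower() for s in sort_order]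
--
--     return [(SORT_KEY_NAMES.index(s.lower()), -1 if is_upper(s) else 1) for s in sort_order]
-- ===== SOURCE B (Python) =====
-- SORT_KEY_NAMES = ['k', 'n', 'r', 'm', 'd']
--
-- def is_upper(s):
--     return s.upper() == s
--
-- def make_sort_key(options):
--     """Make results sort key described in module doc string"""
--     seen = set()
--     result = []
--     for s in options:
--         sl = s.lower()
--         if sl in SORT_KEY_NAMES and sl not in seen:
--             seen.add(sl)
--             result.append(s)
--     result.extend(n for n in SORT_KEY_NAMES if n not in seen)
--     return [(SORT_KEY_NAMES.index(s.lower()), -1 if is_upper(s) else 1) for s in result]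
-- ===== Notes on version B (the rewrite author's own statement) =====
-- stated objective: simpler
-- what changed: Replaces A's reversed move-to-front loop (repeated index/slice/rebuild of two parallel lists) with a single forward pass keeping a seen-set of lowercased letters plus an append of the unmentioned SORT_KEY_NAMES letters.
import Mathlib
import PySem

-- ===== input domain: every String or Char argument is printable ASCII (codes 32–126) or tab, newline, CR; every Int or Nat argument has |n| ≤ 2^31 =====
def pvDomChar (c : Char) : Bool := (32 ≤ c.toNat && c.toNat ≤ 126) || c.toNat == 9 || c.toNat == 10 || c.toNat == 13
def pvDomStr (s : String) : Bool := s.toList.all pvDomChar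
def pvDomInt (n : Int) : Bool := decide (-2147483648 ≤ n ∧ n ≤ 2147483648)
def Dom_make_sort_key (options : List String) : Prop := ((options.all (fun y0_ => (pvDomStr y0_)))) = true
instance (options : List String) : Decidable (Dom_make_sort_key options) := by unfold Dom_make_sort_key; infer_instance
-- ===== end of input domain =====

-- B replaces A's reversed move-to-front loop (with its repeated index/slice/rebuild of parallel
-- lists) by a single forward pass with a seen-set: simpler and one pass.  Equivalence of the
-- RETURN value is what is proved; neither program mutates its argument.

-- ===== PORT A =====
def SORT_KEY_NAMES : List String := ["k", "n", "r", "m", "d"]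

def is_upper (s : String) : Bool := PySem.Str.upper s == s

-- one iteration of A's `for s in reversed(options)` body (state = (sort_order, sort_order_lower))
def mskStepA (st : List String × List String) (s : String) : List String × List String :=
  if !(st.2.contains (PySem.Str.lower s)) then st   -- `continue`
  else
    match PySem.List.index? st.2 (PySem.Str.lower s) with
    | none => st   -- unreachable: the membership test above succeeded
    | some i =>
      let so := s :: (PySem.List.slice st.1 none (some (i : Int)) ++
                      PySem.List.slice st.1 (some ((i : Int) + 1)) none)
      (so, so.map PySem.Str.lower)

def make_sort_key (options : List String) : List (Int × Int) :=
  let st := options.reverse.foldl mskStepA (SORT_KEY_NAMES, SORT_KEY_NAMES.map PySem.Str.lower)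
  -- Python's .index would raise ValueError if absent; the loop invariant keeps every lower in
  -- SORT_KEY_NAMES, so the `getD 0` default is never taken.
  st.1.map (fun s => ((((PySem.List.index? SORT_KEY_NAMES (PySem.Str.lower s)).getD 0 : Nat) : Int),
                      if is_upper s then -1 else 1))

-- ===== PORT B =====
-- one iteration of B's forward loop (state = (seen, result))
def mskStepB (st : PySem.Set String × List String) (s : String) : PySem.Set String × List String :=
  let sl := PySem.Str.lower s
  if SORT_KEY_NAMES.contains sl && !(st.1.contains sl) then (st.1.add sl, st.2 ++ [s]) else st

def make_sort_key_alt (options : List String) : List (Int × Int) :=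
  let st := options.foldl mskStepB (PySem.Set.ofList [], [])
  let result := st.2 ++ SORT_KEY_NAMES.filter (fun n => !(st.1.contains n))
  result.map (fun s => ((((PySem.List.index? SORT_KEY_NAMES (PySem.Str.lower s)).getD 0 : Nat) : Int),
                        if is_upper s then -1 else 1))

-- ===== PRECONDITION & SPEC =====
def Spec_make_sort_key (options : List String) (out : List (Int × Int)) : Prop := out = make_sort_key_alt options
instance (options : List String) (out : List (Int × Int)) : Decidable (Spec_make_sort_key options out) := by unfold Spec_make_sort_key; infer_instance

-- ===== CLAIM (what is proved, stated in full; the proofs are below) =====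
def Claim_equal_make_sort_key : Prop := ∀ (options : List String), Dom_make_sort_key options → Spec_make_sort_key options (make_sort_key options)

-- ===== LEMMAS AND PROOFS =====

-- the first-occurrence pass of B, as a recursive function (seen is threaded by appending)
def mskFirsts (seen : List String) : List String → List String
  | [] => []
  | s :: rest =>
    if SORT_KEY_NAMES.contains (PySem.Str.lower s) && !(seen.contains (PySem.Str.lower s)) then
      s :: mskFirsts (seen ++ [PySem.Str.lower s]) rest
    else mskFirsts seen rest

def mskRem (F : List String) : List String :=
  SORT_KEY_NAMES.filter (fun n => !((F.map PySem.Str.lower).contains n))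

def mskOrder (l : List String) : List String := mskFirsts [] l ++ mskRem (mskFirsts [] l)

-- mskFirsts only looks at membership of `seen`
theorem mskFirsts_congr (l : List String) (s₁ s₂ : List String)
    (h : ∀ x, s₁.contains x = s₂.contains x) : mskFirsts s₁ l = mskFirsts s₂ l := by
  induction l generalizing s₁ s₂ with
  | nil => rfl
  | cons t rest ih =>
    simp only [mskFirsts, h]
    split
    · refine congrArg _ (ih _ _ ?_)
      intro x
      simp only [List.contains_append, h x]
    · exact ih _ _ h

theorem mskFirsts_keys_sub (l : List String) (seen : List String) :
    ∀ x ∈ (mskFirsts seen l).map PySem.Str.lower, x ∈ SORT_KEY_NAMES ∧ x ∉ seen := by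
  induction l generalizing seen with
  | nil => simp [mskFirsts]
  | cons t rest ih =>
    simp only [mskFirsts]
    split
    · rename_i h
      simp only [Bool.and_eq_true, Bool.not_eq_true', List.contains_eq_mem, decide_eq_true_eq,
        decide_eq_false_iff_not] at h
      intro x hx
      simp only [List.map_cons, List.mem_cons] at hx
      rcases hx with rfl | hx
      · exact ⟨h.1, h.2⟩
      · have := ih (seen ++ [PySem.Str.lower t]) x hx
        exact ⟨this.1, fun hc => this.2 (by simp [hc])⟩
    · exact ih seen

theorem mskFirsts_keys_nodup (l : List String) (seen : List String) :
    ((mskFirsts seen l).map PySem.Str.lower).Nodup := by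
  induction l generalizing seen with
  | nil => simp [mskFirsts]
  | cons t rest ih =>
    simp only [mskFirsts]
    split
    · simp only [List.map_cons, List.nodup_cons]
      refine ⟨fun hc => ?_, ih _⟩
      have := (mskFirsts_keys_sub rest (seen ++ [PySem.Str.lower t]) _ hc).2
      simp at this
    · exact ih seen

-- widening seen by one key filters that key out of the result
theorem mskFirsts_append_key (l : List String) (k : String) :
    ∀ seen, mskFirsts (seen ++ [k]) l = (mskFirsts seen l).filter (fun t => !(PySem.Str.lower t == k)) := by
  induction l with
  | nil => intro seen; rfl
  | cons t rest ih =>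
    intro seen
    simp only [mskFirsts]
    by_cases hn : SORT_KEY_NAMES.contains (PySem.Str.lower t) = true
    · by_cases hs : seen.contains (PySem.Str.lower t) = true
      · have h1 : ((seen ++ [k]).contains (PySem.Str.lower t)) = true := by
          rw [List.contains_append, hs]; rfl
        simp only [hn, h1, hs, Bool.not_true, Bool.and_false, Bool.false_eq_true, if_false, ih]
      · have hs' : seen.contains (PySem.Str.lower t) = false := Bool.eq_false_iff.2 hs
        by_cases hk : PySem.Str.lower t = k
        · have h1 : ((seen ++ [k]).contains (PySem.Str.lower t)) = true := by
            rw [List.contains_append]; simp [hk]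
          have hpred : (!(PySem.Str.lower t == k)) = false := by simp [hk]
          simp only [hn, h1, Bool.not_true, Bool.and_false, Bool.false_eq_true, if_false,
            hs', Bool.not_false, Bool.and_true, if_true, List.filter_cons, hpred]
          rw [hk, ih seen, List.filter_filter]
          simp
        · have h1 : ((seen ++ [k]).contains (PySem.Str.lower t)) = false := by
            rw [List.contains_append, hs']; simp [hk]
          have hpred : (!(PySem.Str.lower t == k)) = true := by simp [hk]
          simp only [hn, h1, hs', Bool.not_false, Bool.and_true, if_true, List.filter_cons, hpred]
          refine congrArg _ ?_
          rw [mskFirsts_congr rest ((seen ++ [k]) ++ [PySem.Str.lower t])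
                ((seen ++ [PySem.Str.lower t]) ++ [k]) ?_, ih]
          intro x
          simp only [List.contains_append, Bool.or_assoc]
          rw [Bool.or_comm (([k].contains x)) (([PySem.Str.lower t].contains x))]
    · have hn' : SORT_KEY_NAMES.contains (PySem.Str.lower t) = false := Bool.eq_false_iff.2 hn
      simp only [hn', Bool.false_and, Bool.false_eq_true, if_false, ih]

-- no element matches → filter is the identity
theorem filter_eq_self_of_no_match (F : List String) (k : String)
    (h : k ∉ F.map PySem.Str.lower) :
    F.filter (fun t => !(PySem.Str.lower t == k)) = F := by
  induction F with
  | nil => rfl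
  | cons t rest ih =>
    simp only [List.map_cons, List.mem_cons, not_or] at h
    simp only [List.filter_cons]
    have : (!(PySem.Str.lower t == k)) = true := by simp; exact fun e => h.1 e.symm
    simp [this, ih h.2]

-- with nodup keys, erasing the first match is filtering
theorem eraseP_eq_filter_of_nodup_keys (F : List String) (k : String)
    (h : (F.map PySem.Str.lower).Nodup) :
    F.eraseP (fun t => PySem.Str.lower t == k) = F.filter (fun t => !(PySem.Str.lower t == k)) := by
  induction F with
  | nil => rfl
  | cons t rest ih =>
    simp only [List.map_cons, List.nodup_cons] at h
    by_cases hk : PySem.Str.lower t = k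
    · simp only [List.eraseP_cons, List.filter_cons, hk, beq_self_eq_true,
        Bool.not_true]
      exact (filter_eq_self_of_no_match rest k (hk ▸ h.1)).symm
    · have : (PySem.Str.lower t == k) = false := by simp [hk]
      simp [this, ih h.2]

-- take i ++ drop (i+1) at the first index of k among the keys = eraseP
theorem take_drop_eq_eraseP (so : List String) (k : String) :
    ∀ i, PySem.List.index? (so.map PySem.Str.lower) k = some i →
      List.take i so ++ List.drop (i + 1) so = so.eraseP (fun t => PySem.Str.lower t == k) := by
  induction so with
  | nil => intro i h; simp [PySem.List.index?, List.idxOf?] at h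
  | cons t rest ih =>
    intro i h
    simp only [PySem.List.index?] at h ih
    by_cases hk : k = PySem.Str.lower t
    · have : List.idxOf? k (List.map PySem.Str.lower (t :: rest)) = some 0 := by
        simp [List.idxOf?_cons, hk]
      rw [this] at h
      cases h
      simp [hk.symm]
    · have hk' : ¬ PySem.Str.lower t = k := fun e => hk e.symm
      have hne : (PySem.Str.lower t == k) = false := by simp [hk']
      have hstep : List.idxOf? k (List.map PySem.Str.lower (t :: rest)) =
          (List.idxOf? k (List.map PySem.Str.lower rest)).map (· + 1) := by
        simp [List.idxOf?_cons, hk']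
      rw [hstep] at h
      cases hrec : List.idxOf? k (List.map PySem.Str.lower rest) with
      | none => rw [hrec] at h; simp at h
      | some j =>
        rw [hrec] at h
        simp only [Option.map_some] at h
        cases h
        simp only [List.take_succ_cons, List.drop_succ_cons, List.cons_append,
          List.eraseP_cons, hne]
        exact congrArg _ (ih j hrec)

theorem keyNames : ∀ n ∈ SORT_KEY_NAMES, PySem.Str.lower n = n := by decide

theorem namesNodup : SORT_KEY_NAMES.Nodup := by decide

theorem map_lower_rem (F : List String) : (mskRem F).map PySem.Str.lower = mskRem F := by
  have : ∀ n ∈ mskRem F, PySem.Str.lower n = n := fun n hn =>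
    keyNames n (List.mem_of_mem_filter hn)
  exact List.map_congr_left this |>.trans (List.map_id _)

theorem mem_keys_order (l : List String) (x : String) :
    (x ∈ (mskOrder l).map PySem.Str.lower) ↔ x ∈ SORT_KEY_NAMES := by
  simp only [mskOrder, List.map_append, List.mem_append, map_lower_rem]
  constructor
  · rintro (h | h)
    · exact (mskFirsts_keys_sub l [] x h).1
    · exact List.mem_of_mem_filter h
  · intro hx
    by_cases hF : x ∈ (mskFirsts [] l).map PySem.Str.lower
    · exact Or.inl hF
    · refine Or.inr ?_
      simp only [mskRem, List.mem_filter, hx, true_and, List.contains_eq_mem,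
        Bool.not_eq_true', decide_eq_false_iff_not]
      intro hc
      exact hF hc

-- A's loop, run right-to-left, computes mskOrder with its key list alongside
theorem foldr_stepA (l : List String) :
    List.foldr (fun s st => mskStepA st s) (SORT_KEY_NAMES, SORT_KEY_NAMES.map PySem.Str.lower) l
      = (mskOrder l, (mskOrder l).map PySem.Str.lower) := by
  induction l with
  | nil =>
    have h0 : mskOrder [] = SORT_KEY_NAMES := by decide
    simp [h0]
  | cons s rest ih =>
    simp only [List.foldr_cons, ih]
    set k := PySem.Str.lower s with hk
    by_cases hmem : k ∈ SORT_KEY_NAMES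
    · -- membership test succeeds
      have hcont : ((mskOrder rest).map PySem.Str.lower).contains k = true := by
        simp [List.contains_eq_mem, (mem_keys_order rest k).2 hmem]
      have hidx : ∃ i, PySem.List.index? ((mskOrder rest).map PySem.Str.lower) k = some i := by
        simp only [PySem.List.index?]
        have hm : k ∈ (mskOrder rest).map PySem.Str.lower := (mem_keys_order rest k).2 hmem
        exact Option.isSome_iff_exists.1 (List.isSome_idxOf?.mpr hm)
      rcases hidx with ⟨i, hi⟩
      have hi' : 0 ≤ (i : Int) := by positivity
      have horder : mskOrder (s :: rest)
          = s :: (mskOrder rest).eraseP (fun t => PySem.Str.lower t == k) := by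
        -- unfold firsts at the head
        have hF : mskFirsts [] (s :: rest) = s :: mskFirsts [k] rest := by
          have hn : SORT_KEY_NAMES.contains k = true := by
            simpa [List.contains_eq_mem] using hmem
          simp only [mskFirsts, ← hk, hn, List.contains_nil, Bool.not_false, Bool.and_true,
            if_true, List.nil_append]
        have hF2 : mskFirsts [k] rest
            = (mskFirsts [] rest).filter (fun t => !(PySem.Str.lower t == k)) := by
          simpa using mskFirsts_append_key rest k []
        set F := mskFirsts [] rest with hFdef
        by_cases hkF : k ∈ F.map PySem.Str.lower
        · -- k occurs among the firsts
          rcases List.mem_map.1 hkF with ⟨a, haF, hak⟩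
          have hera : (F ++ mskRem F).eraseP (fun t => PySem.Str.lower t == k)
              = F.eraseP (fun t => PySem.Str.lower t == k) ++ mskRem F :=
            List.eraseP_append_left (by simp [hak]) _ haF
          have heraF : F.eraseP (fun t => PySem.Str.lower t == k)
              = F.filter (fun t => !(PySem.Str.lower t == k)) :=
            eraseP_eq_filter_of_nodup_keys F k (mskFirsts_keys_nodup rest [])
          have hmemeq : ∀ n, ((k :: (F.filter (fun t => !(PySem.Str.lower t == k))).map PySem.Str.lower).contains n)
              = ((F.map PySem.Str.lower).contains n) := by
            intro n
            simp only [List.contains_eq_mem, List.mem_cons, decide_eq_decide]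
            constructor
            · rintro (rfl | hn)
              · exact hkF
              · rcases List.mem_map.1 hn with ⟨b, hbF, hbn⟩
                exact List.mem_map.2 ⟨b, (List.mem_filter.1 hbF).1, hbn⟩
            · intro hn
              by_cases hnk : n = k
              · exact Or.inl hnk
              · rcases List.mem_map.1 hn with ⟨b, hbF, hbn⟩
                refine Or.inr (List.mem_map.2 ⟨b, List.mem_filter.2 ⟨hbF, ?_⟩, hbn⟩)
                simp only [Bool.not_eq_eq_eq_not, Bool.not_true, beq_eq_false_iff_ne, ne_eq]
                intro e; exact hnk (hbn ▸ e ▸ rfl)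
          have hremeq : mskRem (s :: F.filter (fun t => !(PySem.Str.lower t == k))) = mskRem F := by
            simp only [mskRem]
            refine List.filter_congr ?_
            intro n hn
            rw [List.map_cons, ← hk, hmemeq n]
          calc mskOrder (s :: rest)
              = (s :: mskFirsts [k] rest) ++ mskRem (s :: mskFirsts [k] rest) := by
                simp [mskOrder, hF]
            _ = s :: (F.filter (fun t => !(PySem.Str.lower t == k)) ++ mskRem F) := by
                rw [hF2, hremeq]; simp
            _ = s :: (mskOrder rest).eraseP (fun t => PySem.Str.lower t == k) := by
                rw [mskOrder, ← hFdef, hera, heraF]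
        · -- k does not occur among the firsts; it sits in the remainder
          have hnoF : ∀ b ∈ F, ¬ ((fun t => PySem.Str.lower t == k) b = true) := by
            intro b hb hbk
            exact hkF (List.mem_map.2 ⟨b, hb, by simpa using hbk⟩)
          have hera : (F ++ mskRem F).eraseP (fun t => PySem.Str.lower t == k)
              = F ++ (mskRem F).eraseP (fun t => PySem.Str.lower t == k) :=
            List.eraseP_append_right _ hnoF
          have hRnodup : ((mskRem F).map PySem.Str.lower).Nodup := by
            rw [map_lower_rem]; exact List.Nodup.filter _ namesNodup
          have heraR : (mskRem F).eraseP (fun t => PySem.Str.lower t == k)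
              = (mskRem F).filter (fun t => !(PySem.Str.lower t == k)) :=
            eraseP_eq_filter_of_nodup_keys _ k hRnodup
          have hFid : mskFirsts [k] rest = F := by
            rw [hF2]; exact filter_eq_self_of_no_match F k hkF
          have hrem2 : mskRem (s :: F) = (mskRem F).filter (fun t => !(PySem.Str.lower t == k)) := by
            simp only [mskRem, List.filter_filter]
            refine List.filter_congr ?_
            intro n hn
            have hln : PySem.Str.lower n = n := keyNames n hn
            rw [List.map_cons, ← hk, List.contains_cons, Bool.not_or, hln, Bool.and_comm]
          calc mskOrder (s :: rest)
              = (s :: F) ++ mskRem (s :: F) := by simp [mskOrder, hF, hFid]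
            _ = s :: (F ++ (mskRem F).filter (fun t => !(PySem.Str.lower t == k))) := by
                rw [hrem2]; simp
            _ = s :: (mskOrder rest).eraseP (fun t => PySem.Str.lower t == k) := by
                rw [mskOrder, ← hFdef, hera, heraR]
      -- now compute the step
      have htd := take_drop_eq_eraseP (mskOrder rest) k i hi
      simp only [mskStepA]
      rw [← hk, hcont]
      simp only [Bool.not_true, Bool.false_eq_true, if_false, hi]
      have hc1 : ((i : Int)).toNat = i := by simp
      have hc2 : ((i : Int) + 1).toNat = i + 1 := by omega
      rw [PySem.List.slice_to _ hi', PySem.List.slice_from _ (by positivity : (0:Int) ≤ (i:Int)+1),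
        hc1, hc2, htd, ← horder]
    · -- membership test fails: `continue`
      have hcont : ((mskOrder rest).map PySem.Str.lower).contains k = false := by
        simp only [List.contains_eq_mem, decide_eq_false_iff_not]
        exact fun h => hmem ((mem_keys_order rest k).1 h)
      have horder : mskOrder (s :: rest) = mskOrder rest := by
        have hn' : SORT_KEY_NAMES.contains (PySem.Str.lower s) = false := by
          simp only [List.contains_eq_mem, decide_eq_false_iff_not]
          rw [← hk]; exact hmem
        have : mskFirsts [] (s :: rest) = mskFirsts [] rest := by
          simp only [mskFirsts, hn', Bool.false_and, Bool.false_eq_true, if_false]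
        simp [mskOrder, this]
      simp only [mskStepA]
      rw [← hk, hcont]
      simp only [Bool.not_false, if_true, horder]

-- B's loop computes (seen, result) = (seen₀ ++ keys of new firsts, result₀ ++ firsts)
theorem foldl_stepB (l : List String) :
    ∀ (S res : List String),
      List.foldl mskStepB (S, res) l
        = (S ++ (mskFirsts S l).map PySem.Str.lower, res ++ mskFirsts S l) := by
  induction l with
  | nil => intro S res; simp [mskFirsts]
  | cons s rest ih =>
    intro S res
    rw [List.foldl_cons]
    by_cases hp : PySem.Str.lower s ∈ SORT_KEY_NAMES ∧ PySem.Str.lower s ∉ S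
    · have hcond : (SORT_KEY_NAMES.contains (PySem.Str.lower s)
          && !(S.contains (PySem.Str.lower s))) = true := by
        simp [List.contains_eq_mem, hp.1, hp.2]
      have hS : S.contains (PySem.Str.lower s) = false := by
        simp [List.contains_eq_mem, hp.2]
      have hstep : mskStepB (S, res) s = (S ++ [PySem.Str.lower s], res ++ [s]) := by
        simp [mskStepB, PySem.Set.add, List.contains_eq_mem, hp.1, hp.2]
      have hfir : mskFirsts S (s :: rest) = s :: mskFirsts (S ++ [PySem.Str.lower s]) rest := by
        simp only [mskFirsts, hcond, if_true]
      rw [hstep, ih, hfir]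
      simp
    · have hcond : (SORT_KEY_NAMES.contains (PySem.Str.lower s)
          && !(S.contains (PySem.Str.lower s))) = false := by
        simp only [Bool.and_eq_false_iff, List.contains_eq_mem, decide_eq_false_iff_not,
          Bool.not_eq_false', decide_eq_true_eq]
        by_cases h1 : PySem.Str.lower s ∈ SORT_KEY_NAMES
        · right; by_contra h2; exact hp ⟨h1, h2⟩
        · left; exact h1
      have hstep : mskStepB (S, res) s = (S, res) := by
        simp only [mskStepB]
        simp only [List.contains_eq_mem]
        rw [if_neg (by
          simp only [Bool.and_eq_true, Bool.not_eq_true', decide_eq_true_eq]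
          intro h
          refine hp ⟨h.1, ?_⟩
          have h2 : S.contains (PySem.Str.lower s) = false := h.2
          simpa [List.contains_eq_mem] using h2)]
      have hfir : mskFirsts S (s :: rest) = mskFirsts S rest := by
        simp only [mskFirsts, hcond, Bool.false_eq_true, if_false]
      rw [hstep, ih, hfir]

-- ===== VERDICT (by name: the statement is the Claim_ definition above) =====
theorem make_sort_key_spec : Claim_equal_make_sort_key := by
  intro options _
  unfold Spec_make_sort_key make_sort_key make_sort_key_alt
  rw [List.foldl_reverse, foldr_stepA]
  have hB := foldl_stepB options [] []
  have h0 : (PySem.Set.ofList ([] : List String)) = ([] : List String) := rfl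
  rw [h0, hB]
  simp only [List.nil_append]
  rfl
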